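-- pv_equiv track=rewrite | github.com/KryptoNights/nexus-pay | backend/nexus-query-startswith.py | next_string
-- ===== SOURCE A (Python) =====
-- def next_string(s):
--     """
--     Finds the next string in the chronological order of characters.
--
--     Args:
--         s: The input string.
--
--     Returns:
--         The next string in the chronological order of characters.
--     """
--
--     result = list(s)
--     carryover = 1
--
--     for i in range(len(result) - 1, -1, -1):
--         if carryover == 0:
--             break
--
--         result[i] = chr(ord(result[i]) + carryover)
--         if result[i] > 'z':
--             carryover = 1
--             result[i] = 'a'
--         else:
--             carryover = 0
--
--     if carryover == 1:
--         result.insert(0, 'a')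
--
--     return ''.join(result)
-- ===== SOURCE B (Python) =====
-- def next_string(s):
--     """Recursive decomposition: bump the last char, or carry into the prefix."""
--     if not s:
--         return 'a'
--     if s[-1] < 'z':
--         return s[:-1] + chr(ord(s[-1]) + 1)
--     return next_string(s[:-1]) + 'a'
-- ===== Notes on version B (the rewrite author's own statement) =====
-- stated objective: simpler
-- what changed: Replaced A's index loop with a mutable char list and an explicit carry variable by a three-line recursion on the last character (bump it if below 'z', else carry into the prefix and append 'a'); avoids list(s)/join and per-char mutation.
import Mathlib
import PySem

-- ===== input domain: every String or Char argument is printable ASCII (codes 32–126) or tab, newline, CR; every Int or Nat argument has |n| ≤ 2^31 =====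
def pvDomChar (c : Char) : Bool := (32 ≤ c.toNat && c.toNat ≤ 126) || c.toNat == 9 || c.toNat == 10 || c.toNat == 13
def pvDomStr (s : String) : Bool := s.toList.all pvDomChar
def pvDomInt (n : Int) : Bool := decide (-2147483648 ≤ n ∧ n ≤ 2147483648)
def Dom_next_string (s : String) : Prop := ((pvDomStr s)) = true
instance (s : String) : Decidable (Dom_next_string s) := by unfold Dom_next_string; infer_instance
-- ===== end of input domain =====

-- B is a simpler recursive decomposition (bump last char or carry into the prefix) replacing A's
-- index loop with an in-place carry variable; same return value on the whole domain.

-- ===== PORT A =====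
-- A walks i from len-1 down to 0 over the mutable char list, adding the carry to result[i] and
-- breaking once the carry is 0; we transcribe the loop as a recursion over the REVERSED char list
-- (same visit order, same state: the processed chars and the carryover), then restore the order
-- and, as in A, insert a leading 'a' if the carry survived.
def nsLoopA : List Char → Int → List Char × Int
  | [], c => ([], c)
  | x :: xs, c =>
    if c == 0 then (x :: xs, c)                     -- 'break': the rest stays unchanged
    else
      let x' := Char.ofNat (x.toNat + c.toNat)      -- result[i] = chr(ord(result[i]) + carryover)
      if x' > 'z' then
        let r := nsLoopA xs 1                       -- carryover = 1; result[i] = 'a'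
        ('a' :: r.1, r.2)
      else (x' :: xs, 0)                            -- carryover = 0

def next_string (s : String) : String :=
  let r := nsLoopA s.toList.reverse 1
  let res := r.1.reverse
  String.mk (if r.2 == 1 then 'a' :: res else res)  -- result.insert(0, 'a') when carry remains

-- ===== PORT B =====
-- Source B's recursion on the last character, transcribed as structural recursion on the reversed list.
def nsAltRev : List Char → List Char
  | [] => ['a']                                               -- next_string('') = 'a'
  | x :: xs => if x < 'z' then Char.ofNat (x.toNat + 1) :: xs -- s[:-1] + chr(ord(s[-1]) + 1)
               else 'a' :: nsAltRev xs                        -- next_string(s[:-1]) + 'a'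

def next_string_alt (s : String) : String :=
  String.mk ((nsAltRev s.toList.reverse).reverse)

-- ===== PRECONDITION & SPEC =====
def Spec_next_string (s : String) (out : String) : Prop := out = next_string_alt s
instance (s : String) (out : String) : Decidable (Spec_next_string s out) := by unfold Spec_next_string; infer_instance

-- ===== CLAIM (what is proved, stated in full; the proofs are below) =====
def Claim_equal_next_string : Prop := ∀ (s : String), Dom_next_string s → Spec_next_string s (next_string s)

-- ===== LEMMAS AND PROOFS =====

-- Unfolding A's loop one step (normalises the Int carry literal away).
theorem nsLoopA_cons (x : Char) (xs : List Char) :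
    nsLoopA (x :: xs) 1 =
      if Char.ofNat (x.toNat + 1) > 'z' then ('a' :: (nsLoopA xs 1).1, (nsLoopA xs 1).2)
      else (Char.ofNat (x.toNat + 1) :: xs, 0) := by
  simp [nsLoopA]

-- On the reversed list, A's loop followed by the carry fix-up equals B's recursion.
theorem nsLoopA_eq_altRev (l : List Char) (h : ∀ x ∈ l, pvDomChar x = true) :
    (if (nsLoopA l 1).2 == 1 then (nsLoopA l 1).1 ++ ['a'] else (nsLoopA l 1).1) = nsAltRev l := by
  induction l with
  | nil => simp [nsLoopA, nsAltRev]
  | cons x xs ih =>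
    have hx : pvDomChar x = true := h x (List.mem_cons_self ..)
    have hxs : ∀ y ∈ xs, pvDomChar y = true := fun y hy => h y (List.mem_cons_of_mem _ hy)
    have hxle : x.toNat ≤ 126 := by
      simp only [pvDomChar, Bool.or_eq_true, Bool.and_eq_true, decide_eq_true_eq, beq_iff_eq] at hx
      omega
    have hvalid : (x.toNat + 1).isValidChar := Or.inl (by omega)
    have htoNat : (Char.ofNat (x.toNat + 1)).toNat = x.toNat + 1 := by
      simp only [Char.ofNat]
      rw [dif_pos hvalid]
      rfl
    rw [nsLoopA_cons]
    by_cases hz : Char.ofNat (x.toNat + 1) > 'z'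
    · have hxz : ¬ x < 'z' := by
        intro hlt
        have h1 : x.toNat < 'z'.toNat := hlt
        have h2 : 'z'.toNat < (Char.ofNat (x.toNat + 1)).toNat := hz
        rw [htoNat] at h2
        omega
      rw [if_pos hz]
      simp only [nsAltRev, if_neg hxz]
      rw [← ih hxs]
      split <;> simp
    · have hxz : x < 'z' := by
        have h2 : (Char.ofNat (x.toNat + 1)).toNat ≤ 'z'.toNat := Nat.le_of_not_lt hz
        rw [htoNat] at h2
        show x.toNat < 'z'.toNat
        omega
      rw [if_neg hz]
      simp [nsAltRev, hxz]

-- ===== VERDICT (by name: the statement is the Claim_ definition above) =====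
theorem next_string_spec : Claim_equal_next_string := by
  intro s hdom
  unfold Spec_next_string next_string next_string_alt
  have h : ∀ x ∈ s.toList.reverse, pvDomChar x = true := by
    intro x hx
    have := (List.all_eq_true.mp hdom) x (List.mem_reverse.mp hx)
    simpa using this
  have key := nsLoopA_eq_altRev s.toList.reverse h
  rw [← key]
  by_cases hc : (nsLoopA s.toList.reverse 1).2 == 1
  · simp [hc]
  · simp [hc]
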